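-- pv_equiv track=rewrite | github.com/ZJU-Automated-Reasoning-Group/Spear | spear/tests/TestSoundComplete.py | isSound
-- ===== SOURCE A (Python) =====
-- def isSound(output, groundtruth):
--     for caller, callees in groundtruth.items():
--         if callees and caller not in output:
--             return False
--         for callee in callees:
--             if callee not in output[caller]:
--                 return False
--     return True
-- ===== SOURCE B (Python) =====
-- def isSound(output, groundtruth):
--     out_edges = {(caller, callee) for caller in output for callee in output[caller]}
--     req = {(caller, callee) for caller, callees in groundtruth.items() for callee in callees}
--     return req <= out_edges
-- ===== Notes on version B (the rewrite author's own statement) =====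
-- stated objective: alternative
-- what changed: B materialises one flat set of (caller,callee) edges from output and one from groundtruth and returns a single subset test, replacing A's per-caller nested membership scan with early returns.
import Mathlib
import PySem

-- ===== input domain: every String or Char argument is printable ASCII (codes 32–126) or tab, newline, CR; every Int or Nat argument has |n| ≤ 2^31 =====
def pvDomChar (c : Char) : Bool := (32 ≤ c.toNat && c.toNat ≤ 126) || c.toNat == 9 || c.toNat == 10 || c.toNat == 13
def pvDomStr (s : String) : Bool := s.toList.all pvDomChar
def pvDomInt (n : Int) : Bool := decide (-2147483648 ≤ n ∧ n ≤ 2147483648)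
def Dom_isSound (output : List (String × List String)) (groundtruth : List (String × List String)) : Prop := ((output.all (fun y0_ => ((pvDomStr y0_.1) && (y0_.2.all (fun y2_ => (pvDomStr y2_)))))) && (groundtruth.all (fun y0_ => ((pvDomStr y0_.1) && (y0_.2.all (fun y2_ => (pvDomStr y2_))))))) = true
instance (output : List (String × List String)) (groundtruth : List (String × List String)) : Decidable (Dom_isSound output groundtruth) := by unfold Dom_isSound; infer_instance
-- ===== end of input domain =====

-- B builds one flat set of (caller, callee) edges per dict and does a single subset test,
-- instead of A's per-caller nested membership scan with early returns (objective: alternative).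

-- ===== PORT A =====
-- A's outer loop over groundtruth.items() with its two early returns.
def isSoundGo (output : List (String × List String)) : List (String × List String) → Bool
  | [] => true
  | (caller, callees) :: rest =>
    if !callees.isEmpty && !((output.map Prod.fst).contains caller) then false
    else if callees.all (fun callee => ((output.lookup caller).getD []).contains callee) then
      isSoundGo output rest
    else false

def isSound (output : List (String × List String)) (groundtruth : List (String × List String)) : Bool :=
  isSoundGo output groundtruth

-- ===== PORT B =====
-- the flat edge set {(caller, callee) | callee ∈ d[caller]} of a dict
def pvEdges (d : List (String × List String)) : List (String × String) :=
  d.flatMap (fun p => p.2.map (fun e => (p.1, e)))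

def isSound_alt (output : List (String × List String)) (groundtruth : List (String × List String)) : Bool :=
  PySem.Set.issubset (PySem.Set.ofList (pvEdges groundtruth)) (PySem.Set.ofList (pvEdges output))

-- ===== PRECONDITION & SPEC =====
-- Pre_ excludes association lists whose output has duplicate caller keys: such a list does not
-- represent a Python dict (which cannot have duplicate keys), and on it A's first-match lookup
-- versus B's iteration over all pairs is an artefact of the list representation.
def Pre_isSound (output : List (String × List String)) (groundtruth : List (String × List String)) : Prop :=
  (output.map Prod.fst).Nodup
instance (output : List (String × List String)) (groundtruth : List (String × List String)) : Decidable (Pre_isSound output groundtruth) := by unfold Pre_isSound; infer_instance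

def pvWitness_isSound : (List (String × List String)) × (List (String × List String)) :=
  ([("f", ["g"]), ("g", [])], [("f", ["g"]), ("h", [])])

def Spec_isSound (output : List (String × List String)) (groundtruth : List (String × List String)) (out : Bool) : Prop := out = isSound_alt output groundtruth
instance (output : List (String × List String)) (groundtruth : List (String × List String)) (out : Bool) : Decidable (Spec_isSound output groundtruth out) := by unfold Spec_isSound; infer_instance

-- ===== CLAIM (what is proved, stated in full; the proofs are below) =====
def Claim_equal_isSound : Prop := ∀ (output : List (String × List String)) (groundtruth : List (String × List String)), Dom_isSound output groundtruth → Pre_isSound output groundtruth → Spec_isSound output groundtruth (isSound output groundtruth)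

-- ===== LEMMAS AND PROOFS =====

-- membership in the flat edge list
theorem mem_pvEdges {d : List (String × List String)} {c e : String} :
    (c, e) ∈ pvEdges d ↔ ∃ cs, (c, cs) ∈ d ∧ e ∈ cs := by
  simp only [pvEdges, List.mem_flatMap, List.mem_map]
  constructor
  · rintro ⟨⟨c', cs⟩, hp, e', he, heq⟩
    cases heq
    exact ⟨cs, hp, he⟩
  · rintro ⟨cs, hp, he⟩
    exact ⟨(c, cs), hp, e, he, rfl⟩

-- lookup succeeds exactly on keys
theorem lookup_isSome_iff (d : List (String × List String)) (c : String) :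
    (d.lookup c).isSome = (d.map Prod.fst).contains c := by
  induction d with
  | nil => rfl
  | cons p rest ih =>
    obtain ⟨c', cs'⟩ := p
    by_cases h : c = c'
    · subst h; simp [List.lookup]
    · have hb : (c == c') = false := by simpa using h
      have hb' : (c' == c) = false := by simpa using Ne.symm h
      simp [List.lookup, hb, hb', ih]

-- with nodup keys, lookup characterises edge membership
theorem lookup_mem_iff {d : List (String × List String)} (hnd : (d.map Prod.fst).Nodup)
    {c e : String} :
    (∃ cs, d.lookup c = some cs ∧ e ∈ cs) ↔ (c, e) ∈ pvEdges d := by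
  rw [mem_pvEdges]
  induction d with
  | nil => simp [List.lookup]
  | cons p rest ih =>
    obtain ⟨c', cs'⟩ := p
    simp only [List.map_cons, List.nodup_cons] at hnd
    by_cases hc : c = c'
    · subst hc
      simp only [List.lookup, beq_self_eq_true, List.mem_cons]
      constructor
      · rintro ⟨cs, hsome, he⟩
        refine ⟨cs, Or.inl ?_, he⟩
        injection hsome with h
        rw [h]
      · rintro ⟨cs, h | h, he⟩
        · refine ⟨cs, ?_, he⟩
          injection h with _ h2
          rw [h2]
        · exact absurd (List.mem_map_of_mem (f := Prod.fst) h) hnd.1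
    · have hb : (c == c') = false := by simpa using hc
      simp only [List.lookup, hb, List.mem_cons]
      rw [ih hnd.2]
      constructor
      · rintro ⟨cs, h, he⟩; exact ⟨cs, Or.inr h, he⟩
      · rintro ⟨cs, h | h, he⟩
        · cases h; exact absurd rfl hc
        · exact ⟨cs, h, he⟩

-- A's loop as a flat conjunction: the early "caller missing" return coincides with the
-- inner loop failing on a nonempty callee list under a none lookup
theorem isSoundGo_eq_all (output : List (String × List String))
    (gt : List (String × List String)) :
    isSoundGo output gt
      = gt.all (fun p => p.2.all (fun e => ((output.lookup p.1).getD []).contains e)) := by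
  induction gt with
  | nil => rfl
  | cons p rest ih =>
    obtain ⟨c, cs⟩ := p
    simp only [isSoundGo, List.all_cons]
    by_cases hmem : ((output.map Prod.fst).contains c : Bool)
    · have hcond : (!cs.isEmpty && !((output.map Prod.fst).contains c)) = false := by
        rw [hmem]; simp
      rw [hcond]
      simp only [Bool.false_eq_true, if_false]
      cases h : cs.all (fun callee => ((output.lookup c).getD []).contains callee) with
      | true => rw [if_pos rfl, ih, Bool.true_and]
      | false => rw [if_neg (by simp), Bool.false_and]
    · have hnone : output.lookup c = none := by
        rw [← Option.not_isSome_iff_eq_none, Bool.not_eq_true, lookup_isSome_iff]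
        simpa using hmem
      cases cs with
      | nil => simp [hmem, ih, hnone]
      | cons x xs => simp [hmem, hnone]

-- B as a flat conjunction over groundtruth edges
theorem isSound_alt_eq_all (output gt : List (String × List String)) :
    isSound_alt output gt
      = (pvEdges gt).all (fun p => (pvEdges output).contains p) := by
  unfold isSound_alt
  simp only [PySem.Set.issubset]
  rw [Bool.eq_iff_iff]
  simp only [List.all_eq_true]
  constructor
  · intro h p hp
    have := h p (by simpa [PySem.Set.mem_ofList] using hp)
    simpa [PySem.Set.contains, PySem.Set.mem_ofList] using this
  · intro h p hp
    have := h p (by simpa [PySem.Set.mem_ofList] using hp)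
    simpa [PySem.Set.contains, PySem.Set.mem_ofList] using this

-- ===== VERDICT (by name: the statement is the Claim_ definition above) =====
theorem isSound_spec : Claim_equal_isSound := by
  intro output gt _ hpre
  unfold Spec_isSound
  rw [isSound, isSoundGo_eq_all, isSound_alt_eq_all, Bool.eq_iff_iff]
  simp only [List.all_eq_true]
  constructor
  · rintro h ⟨c, e⟩ hce
    obtain ⟨cs, hp, he⟩ := mem_pvEdges.mp hce
    have hc := h (c, cs) hp e he
    cases hl : output.lookup c with
    | none => rw [hl] at hc; simp at hc
    | some vs =>
      rw [hl] at hc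
      have hmem : (c, e) ∈ pvEdges output :=
        (lookup_mem_iff hpre).mp ⟨vs, hl, by simpa [List.contains_iff_mem] using hc⟩
      simpa [List.contains_iff_mem] using hmem
  · intro h p hp e he
    have hce : (p.1, e) ∈ pvEdges gt := mem_pvEdges.mpr ⟨p.2, by simpa using hp, he⟩
    have hmem := h (p.1, e) hce
    obtain ⟨cs, hl, hecs⟩ := (lookup_mem_iff hpre).mpr (by simpa [List.contains_iff_mem] using hmem)
    simp [hl, List.contains_iff_mem, hecs]
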